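-- pv_equiv track=rewrite | github.com/EndergamerHUN/advent-of-code-23 | day_3/B.py | count_ratio
-- ===== SOURCE A (Python) =====
-- def count_ratio(lines: list[str], locs: list[tuple[int]]) -> int:
--   mult = 1
--   for x, y in locs:
--     while lines[y][x-1].isdigit():
--       x -= 1
--     number = ""
--     while lines[y][x].isdigit():
--       number += lines[y][x]
--       x += 1
--     mult *= int(number)
--   return mult
-- ===== SOURCE B (Python) =====
-- def _number_index(lines):
--     """One scan over the whole grid: map every digit position (x, y) to the
--     value of the maximal digit run covering it."""
--     table = {}
--     for y, line in enumerate(lines):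
--         i = 0
--         while i < len(line):
--             if line[i].isdigit():
--                 j = i
--                 while j < len(line) and line[j].isdigit():
--                     j += 1
--                 value = int(line[i:j])
--                 for k in range(i, j):
--                     table[(k, y)] = value
--                 i = j
--             else:
--                 i += 1
--     return table
--
-- def count_ratio(lines: list[str], locs: list[tuple[int]]) -> int:
--     table = _number_index(lines)
--     mult = 1
--     for x, y in locs:
--         mult *= table[(x, y)]
--     return mult
-- ===== Notes on version B (the rewrite author's own statement) =====
-- stated objective: alternative
-- what changed: A walks left then right character by character from each location; B builds, in one scan over the whole grid, a dictionary mapping every digit position to the value of the maximal digit run covering it, and then multiplies pure lookups; Pre_ excludes locations that do not point (with non-negative coordinates) at a digit cell readable without Python negative-index wraparound: there A raises, or returns a neighbouring or wrap-merged number left over from its walk, while B's lookup raises KeyError or returns the run at the location.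
-- outside the precondition, e.g. on count_ratio(['9b'], [(1, 0)]): A returns 9, B raises KeyError; on count_ratio(['a12b'], [(-2, 0)]): A returns 12, B raises KeyError; on count_ratio(['1a2'], [(0, 0)]): A returns 21, B returns 1
import Mathlib
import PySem

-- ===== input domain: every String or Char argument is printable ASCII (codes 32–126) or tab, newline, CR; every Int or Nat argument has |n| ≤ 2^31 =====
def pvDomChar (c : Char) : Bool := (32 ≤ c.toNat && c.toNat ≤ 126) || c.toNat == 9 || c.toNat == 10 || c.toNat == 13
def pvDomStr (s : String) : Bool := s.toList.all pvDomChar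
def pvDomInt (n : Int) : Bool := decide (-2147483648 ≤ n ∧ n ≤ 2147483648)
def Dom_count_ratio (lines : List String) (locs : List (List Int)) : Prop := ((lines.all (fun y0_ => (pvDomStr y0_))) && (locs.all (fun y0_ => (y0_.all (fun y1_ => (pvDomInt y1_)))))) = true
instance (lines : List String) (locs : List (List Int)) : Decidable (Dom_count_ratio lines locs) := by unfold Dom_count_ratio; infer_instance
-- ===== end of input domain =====

-- B replaces A's per-location left/right character walks by one scan over the whole grid that
-- indexes every digit position with the value of the number covering it, followed by pure
-- dictionary lookups (objective: alternative).

-- ===== PORT A =====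
-- 'for x, y in locs' unpacking (raises outside Pre_ for malformed locs)
def pyUnpack2 (l : List Int) : Option (Int × Int) :=
  match l with
  | [x, y] => some (x, y)
  | _ => none

-- while lines[y][x-1].isdigit(): x -= 1        (fuel-bounded; fuel 2*len+2 is never exhausted on
-- inputs admitted by Pre_; the `none` branch is Python's IndexError, excluded by Pre_)
def aLeftWalk (s : List Char) : Int → Nat → Int
  | x, 0 => x
  | x, f + 1 =>
    match PySem.List.pyGet? s (x - 1) with
    | some c => if PySem.Chars.isdigit c then aLeftWalk s (x - 1) f else x
    | none => x

-- number = ""; while lines[y][x].isdigit(): number += lines[y][x]; x += 1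
def aRightWalk (s : List Char) : Int → List Char → Nat → List Char
  | _, num, 0 => num
  | x, num, f + 1 =>
    match PySem.List.pyGet? s x with
    | some c => if PySem.Chars.isdigit c then aRightWalk s (x + 1) (num ++ [c]) f else num
    | none => num

def count_ratio (lines : List String) (locs : List (List Int)) : Int :=
  locs.foldl (fun mult l =>
    (pyUnpack2 l).elim mult (fun xy =>
      (PySem.List.pyGet? lines xy.2).elim mult (fun line =>
        let s := line.toList
        let x1 := aLeftWalk s xy.1 (2 * s.length + 2)
        let num := aRightWalk s x1 [] (2 * s.length + 2)
        mult * (PySem.Int.ofChars? num).getD 0))) 1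

-- ===== PORT B =====
-- _number_index's inner scan of one row: each maximal digit run [i, i+len) is inserted into the
-- table at every position it covers, keyed (column, row)
-- (fuel-bounded structural recursion; fuel = row length is never exhausted, since each step
-- consumes at least one character of s)
def bScanRow (y : Int) (s : List Char) (i : Int) (t : PySem.Dict (Int × Int) Int)
    (fuel : Nat) : PySem.Dict (Int × Int) Int :=
  match fuel, s with
  | 0, _ => t
  | _, [] => t
  | f + 1, c :: rest =>
    if PySem.Chars.isdigit c then
      bScanRow y (rest.dropWhile PySem.Chars.isdigit)
        (i + ((c :: rest.takeWhile PySem.Chars.isdigit).length : Int))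
        ((PySem.List.pyRange i (i + ((c :: rest.takeWhile PySem.Chars.isdigit).length : Int))).foldl
          (fun t k =>
            t.insert (k, y) ((PySem.Int.ofChars? (c :: rest.takeWhile PySem.Chars.isdigit)).getD 0)) t)
        f
    else bScanRow y rest (i + 1) t f

def count_ratio_alt (lines : List String) (locs : List (List Int)) : Int :=
  let table := (PySem.List.enumerate lines 0).foldl
    (fun t p => bScanRow p.1 p.2.toList 0 t p.2.toList.length) PySem.Dict.empty
  locs.foldl (fun mult l =>
    (pyUnpack2 l).elim mult (fun xy =>
      -- table[(x, y)]; the `none` branch is Python's KeyError, excluded by Pre_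
      (table.get? xy).elim mult (fun v => mult * v))) 1

-- ===== PRECONDITION & SPEC =====
-- Pre_ admits the locations of the task's natural domain: non-negative coordinates of a digit
-- cell whose run neither reaches the right edge of the row nor starts at column 0 of a row whose
-- last character is also a digit.  Outside it A raises (IndexError/ValueError) or returns an
-- accidental value — on negative coordinates and non-digit cells (where B's dictionary lookup
-- raises KeyError instead), and on runs touching column 0 of a digit-ended row, where A's left
-- walk wraps through Python's negative indices and returns a number merged with the row's
-- trailing digits, an artefact of negative indexing that no span-based reading reproduces.
def PreLoc (lines : List String) (l : List Int) : Bool :=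
  match l with
  | [x, y] =>
    decide (0 ≤ x) && decide (0 ≤ y) &&
    ((PySem.List.pyGet? lines y).elim false (fun line =>
      (PySem.List.pyGet? line.toList x).elim false (fun c =>
        PySem.Chars.isdigit c && !((line.toList.drop x.toNat).all PySem.Chars.isdigit) &&
        !((line.toList.take (x.toNat + 1)).all PySem.Chars.isdigit &&
          ((line.toList[line.toList.length - 1]?).map PySem.Chars.isdigit == some true)))))
  | _ => false

def Pre_count_ratio (lines : List String) (locs : List (List Int)) : Prop :=
  locs.all (PreLoc lines) = true
instance (lines : List String) (locs : List (List Int)) : Decidable (Pre_count_ratio lines locs) := by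
  unfold Pre_count_ratio; infer_instance

def pvWitness_count_ratio : List String × List (List Int) := (["12a"], [[0, 0]])

def Spec_count_ratio (lines : List String) (locs : List (List Int)) (out : Int) : Prop :=
  out = count_ratio_alt lines locs
instance (lines : List String) (locs : List (List Int)) (out : Int) : Decidable (Spec_count_ratio lines locs out) := by
  unfold Spec_count_ratio; infer_instance

-- ===== CLAIM (what is proved, stated in full; the proofs are below) =====
def Claim_equal_count_ratio : Prop := ∀ (lines : List String) (locs : List (List Int)), Dom_count_ratio lines locs → Pre_count_ratio lines locs → Spec_count_ratio lines locs (count_ratio lines locs)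

-- ===== LEMMAS AND PROOFS =====

-- start of the maximal digit run of s containing position u
def runStart (s : List Char) (u : Nat) : Nat :=
  u - (((s.take u).reverse.takeWhile PySem.Chars.isdigit).length)

-- value B stores for every position of the run containing u
def runVal (s : List Char) (u : Nat) : Int :=
  (PySem.Int.ofChars? ((s.drop (runStart s u)).takeWhile PySem.Chars.isdigit)).getD 0

lemma lpre_le (s : List Char) (u : Nat) :
    (((s.take u).reverse.takeWhile PySem.Chars.isdigit).length) ≤ min u s.length := by
  have h := (List.takeWhile_sublist (l := (s.take u).reverse) (p := PySem.Chars.isdigit)).length_le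
  simp at h; omega

lemma drop_all_false_mono (t : List Char) (p u : Nat) (hpu : p ≤ u)
    (h : (t.drop u).all PySem.Chars.isdigit = false) :
    (t.drop p).all PySem.Chars.isdigit = false := by
  by_contra hcon
  rw [Bool.not_eq_false, List.all_eq_true] at hcon
  rw [← Bool.not_eq_true, List.all_eq_true] at h
  refine h ?_
  intro a ha
  refine hcon a ?_
  have h6 : t.drop u = (t.drop p).drop (u - p) := by rw [List.drop_drop]; congr 1; omega
  rw [h6] at ha
  exact List.mem_of_mem_drop ha

-- runStart is unchanged when a digit just left of u is absorbed
lemma runStart_pred (s : List Char) (u : Nat) (hu : u ≤ s.length) (hu1 : 1 ≤ u)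
    (hd : PySem.Chars.isdigit (s[u - 1]'(by omega)) = true) :
    runStart s u = runStart s (u - 1) := by
  have htake : s.take u = s.take (u - 1) ++ [s[u - 1]'(by omega)] := by
    conv_lhs => rw [show u = (u - 1) + 1 by omega]
    rw [List.take_add_one, List.getElem?_eq_getElem (by omega)]
    simp
  have hrev : (s.take u).reverse = s[u - 1]'(by omega) :: (s.take (u - 1)).reverse := by
    rw [htake]; simp
  unfold runStart
  rw [hrev, List.takeWhile_cons_of_pos hd]
  have := lpre_le s (u - 1)
  simp; omega
lemma runStart_stop (s : List Char) (u : Nat) (hu : u ≤ s.length) (hu1 : 1 ≤ u)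
    (hd : PySem.Chars.isdigit (s[u - 1]'(by omega)) = false) :
    runStart s u = u := by
  have htake : s.take u = s.take (u - 1) ++ [s[u - 1]'(by omega)] := by
    conv_lhs => rw [show u = (u - 1) + 1 by omega]
    rw [List.take_add_one, List.getElem?_eq_getElem (by omega)]
    simp
  have hrev : (s.take u).reverse = s[u - 1]'(by omega) :: (s.take (u - 1)).reverse := by
    rw [htake]; simp
  unfold runStart
  rw [hrev, List.takeWhile_cons_of_neg (by simp [hd])]
  simp

-- the left walk stops at the start of the maximal digit run containing u
lemma aLeftWalk_eq (s : List Char) : ∀ (f u : Nat), u < s.length →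
    ((s.take u).all PySem.Chars.isdigit = true →
      (s[s.length - 1]?).map PySem.Chars.isdigit = some false) →
    u < f → aLeftWalk s (u : Int) f = ((runStart s u : Nat) : Int) := by
  intro f
  induction f with
  | zero => omega
  | succ f ih =>
    intro u hu hlast hf
    show (match PySem.List.pyGet? s ((u : Int) - 1) with
      | some c => if PySem.Chars.isdigit c then aLeftWalk s ((u : Int) - 1) f else (u : Int)
      | none => (u : Int)) = _
    rcases Nat.eq_zero_or_pos u with h0 | h1
    · subst h0
      simp only [Nat.cast_zero]
      have hget : PySem.List.pyGet? s ((0 : Int) - 1) = s[s.length - 1]? := by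
        have h1 : (0 : Int) - 1 = -((1 : Nat) : Int) := by norm_num
        rw [h1, PySem.List.pyGet?_neg_natCast s 1 (by omega) (by omega)]
      have hlast' := hlast (by simp)
      rcases hx : s[s.length - 1]? with _ | c
      · rw [hx] at hlast'; simp at hlast'
      · rw [hx] at hlast'
        simp only [Option.map_some, Option.some.injEq] at hlast'
        rw [hget, hx]
        dsimp only
        rw [hlast']
        simp only [Bool.false_eq_true, if_false]
        have : runStart s 0 = 0 := by unfold runStart; simp
        rw [this]
        norm_num
    · have hget : PySem.List.pyGet? s ((u : Int) - 1) = some (s[u - 1]'(by omega)) := by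
        have h1 : (u : Int) - 1 = ((u - 1 : Nat) : Int) := by omega
        rw [h1, PySem.List.pyGet?_of_nonneg _ (by omega)]
        have h2 : ((u - 1 : Nat) : Int).toNat = u - 1 := by omega
        rw [h2, List.getElem?_eq_getElem (by omega)]
      rw [hget]
      dsimp only
      by_cases hd : PySem.Chars.isdigit (s[u - 1]'(by omega)) = true
      · rw [if_pos hd]
        have htake : s.take u = s.take (u - 1) ++ [s[u - 1]'(by omega)] := by
          conv_lhs => rw [show u = (u - 1) + 1 by omega]
          rw [List.take_add_one, List.getElem?_eq_getElem (by omega)]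
          simp
        have hlast' : (s.take (u - 1)).all PySem.Chars.isdigit = true →
            (s[s.length - 1]?).map PySem.Chars.isdigit = some false := by
          intro h
          refine hlast ?_
          rw [htake, List.all_append]
          simp [h, hd]
        have hx1 : (u : Int) - 1 = ((u - 1 : Nat) : Int) := by omega
        rw [hx1, ih (u - 1) (by omega) hlast' (by omega),
          runStart_pred s u (by omega) h1 hd]
      · rw [if_neg hd, runStart_stop s u (by omega) h1 (by simpa using hd)]

-- the right walk appends exactly the maximal digit run starting at position p
lemma aRightWalk_eq (s : List Char) : ∀ (f p : Nat) (num : List Char),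
    (s.drop p).all PySem.Chars.isdigit = false → s.length - p < f →
    aRightWalk s ((p : Nat) : Int) num f = num ++ (s.drop p).takeWhile PySem.Chars.isdigit := by
  intro f
  induction f with
  | zero => omega
  | succ f ih =>
    intro p num hna hf
    have hp : p < s.length := by
      by_contra h
      rw [List.drop_eq_nil_of_le (by omega)] at hna
      simp at hna
    have hget : PySem.List.pyGet? s ((p : Nat) : Int) = some (s[p]'hp) := by
      rw [PySem.List.pyGet?_of_nonneg _ (by omega)]
      have h2 : ((p : Nat) : Int).toNat = p := by omega
      rw [h2, List.getElem?_eq_getElem hp]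
    have hdrop : s.drop p = s[p]'hp :: s.drop (p + 1) := List.drop_eq_getElem_cons hp
    show (match PySem.List.pyGet? s ((p : Nat) : Int) with
      | some c => if PySem.Chars.isdigit c then aRightWalk s (((p : Nat) : Int) + 1) (num ++ [c]) f
                  else num
      | none => num) = _
    rw [hget]
    dsimp only
    by_cases hd : PySem.Chars.isdigit (s[p]'hp) = true
    · rw [if_pos hd]
      have hna' : (s.drop (p + 1)).all PySem.Chars.isdigit = false := by
        by_contra h
        rw [Bool.not_eq_false] at h
        rw [hdrop, List.all_cons, h, hd] at hna
        simp at hna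
      have hx1 : ((p : Nat) : Int) + 1 = ((p + 1 : Nat) : Int) := by omega
      rw [hx1, ih (p + 1) (num ++ [s[p]'hp]) hna' (by omega)]
      rw [hdrop, List.takeWhile_cons_of_pos hd]
      simp
    · rw [if_neg hd]
      rw [hdrop, List.takeWhile_cons_of_neg (by simp [hd])]
      simp

-- a fold of inserts at keys missing p leaves the lookup at p unchanged
lemma get?_foldl_insert_ne (ks : List Int) (y v : Int) (t : PySem.Dict (Int × Int) Int)
    (p : Int × Int) (h : ∀ k ∈ ks, p ≠ (k, y)) :
    (ks.foldl (fun t k => t.insert (k, y) v) t).get? p = t.get? p := by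
  induction ks generalizing t with
  | nil => rfl
  | cons a ks ih =>
    rw [List.foldl_cons, ih _ (fun k hk => h k (List.mem_cons_of_mem _ hk)),
      PySem.Dict.get?_insert_of_ne _ _ (h a (List.mem_cons_self))]

-- the insert loop over range(a, b) sets every key in the range to v
lemma get?_foldl_insert_range (n : Nat) : ∀ (a b q y v : Int) (t : PySem.Dict (Int × Int) Int),
    (b - a).toNat ≤ n → a ≤ q → q < b →
    ((PySem.List.pyRange a b).foldl (fun t k => t.insert (k, y) v) t).get? (q, y) = some v := by
  induction n with
  | zero => intro a b q y v t h h1 h2; omega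
  | succ n ih =>
    intro a b q y v t h h1 h2
    rw [PySem.List.pyRange_one_cons (by omega), List.foldl_cons]
    by_cases hq : q = a
    · subst hq
      rw [get?_foldl_insert_ne _ _ _ _ _ ?hne]
      · exact PySem.Dict.get?_insert_self _ _ _
      case hne =>
        intro k hk heq
        have hm := PySem.List.mem_pyRange_one.mp hk
        have : q = k := congrArg Prod.fst heq
        omega
    · exact ih (a + 1) b q y v _ (by omega) (by omega) h2

-- bScanRow only writes keys (k, y) with i ≤ k
lemma bScanRow_get_out (n : Nat) : ∀ (y : Int) (s : List Char) (i : Int)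
    (t : PySem.Dict (Int × Int) Int) (p : Int × Int), s.length ≤ n → (p.2 ≠ y ∨ p.1 < i) →
    (bScanRow y s i t n).get? p = t.get? p := by
  induction n with
  | zero => intro y s i t p h hp; rfl
  | succ n ih =>
    intro y s i t p h hp
    cases s with
    | nil => rfl
    | cons c rest =>
      rw [bScanRow]
      have htw := (List.takeWhile_sublist (l := rest) (p := PySem.Chars.isdigit)).length_le
      have hdw := (List.dropWhile_sublist (l := rest) (p := PySem.Chars.isdigit)).length_le
      split
      · have h1 : (rest.dropWhile PySem.Chars.isdigit).length ≤ n := by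
          simp at h; omega
        have hp1 : p.2 ≠ y ∨ p.1 < i + ((c :: rest.takeWhile PySem.Chars.isdigit).length : Int) := by
          rcases hp with hp | hp
          · exact Or.inl hp
          · right; omega
        rw [ih y _ _ _ p h1 hp1]
        rw [get?_foldl_insert_ne]
        intro k hk heq
        have hm := PySem.List.mem_pyRange_one.mp hk
        rcases hp with hp | hp
        · exact hp (by rw [heq])
        · have hpk : p.1 = k := by rw [heq]
          omega
      · have h1 : rest.length ≤ n := by simp at h; omega
        have hp1 : p.2 ≠ y ∨ p.1 < i + 1 := by
          rcases hp with hp | hp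
          · exact Or.inl hp
          · right; omega
        exact ih y rest (i + 1) t p h1 hp1

-- bScanRow stores, at every digit position u of s, the value of the run containing u
lemma bScanRow_get_run (n : Nat) : ∀ (y : Int) (s : List Char) (i : Int)
    (t : PySem.Dict (Int × Int) Int) (u : Nat), s.length ≤ n → ∀ (hu : u < s.length),
    PySem.Chars.isdigit (s[u]'hu) = true →
    (bScanRow y s i t n).get? (i + (u : Int), y) = some (runVal s u) := by
  induction n with
  | zero => intro y s i t u h hu; omega
  | succ n ih =>
    intro y s i t u h hu hd
    cases s with
    | nil => simp at hu
    | cons c rest =>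
      rw [bScanRow]
      have htwl := (List.takeWhile_sublist (l := rest) (p := PySem.Chars.isdigit)).length_le
      have hdwl := (List.dropWhile_sublist (l := rest) (p := PySem.Chars.isdigit)).length_le
      have htwdw : (rest.takeWhile PySem.Chars.isdigit).length
          + (rest.dropWhile PySem.Chars.isdigit).length = rest.length := by
        rw [← List.length_append, List.takeWhile_append_dropWhile]
      by_cases hc : PySem.Chars.isdigit c = true
      · rw [if_pos hc]
        have hds_tw : c :: rest.takeWhile PySem.Chars.isdigit
            = (c :: rest).takeWhile PySem.Chars.isdigit := by
          rw [List.takeWhile_cons_of_pos hc]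
        have hL2 : (c :: rest.takeWhile PySem.Chars.isdigit).length
            = (rest.takeWhile PySem.Chars.isdigit).length + 1 := by simp
        have hsplit : c :: rest
            = (c :: rest.takeWhile PySem.Chars.isdigit) ++ rest.dropWhile PySem.Chars.isdigit := by
          rw [hds_tw]
          conv_lhs => rw [← List.takeWhile_append_dropWhile (p := PySem.Chars.isdigit) (l := c :: rest)]
          rw [List.dropWhile_cons_of_pos hc]
        by_cases hxL : u < (c :: rest.takeWhile PySem.Chars.isdigit).length
        · -- inside the leading run: the insert loop wrote this key
          have hall : ∀ a ∈ (c :: rest).take u, PySem.Chars.isdigit a = true := by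
            intro a ha
            have hpre1 : (c :: rest).take u <+: (c :: rest).takeWhile PySem.Chars.isdigit := by
              apply List.prefix_of_prefix_length_le (List.take_prefix _ _)
                (List.takeWhile_prefix _)
              rw [← hds_tw, List.length_take]
              omega
            exact List.mem_takeWhile_imp (hpre1.subset ha)
          have hlpre : (((c :: rest).take u).reverse.takeWhile PySem.Chars.isdigit).length = u := by
            rw [List.takeWhile_eq_self_iff.mpr (by intro a ha; exact hall a (List.mem_reverse.mp ha))]
            rw [List.length_reverse, List.length_take]
            omega
          have hrs : runStart (c :: rest) u = 0 := by unfold runStart; omega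
          rw [bScanRow_get_out n _ _ _ _ _ (by simp at h ⊢; omega) (by right; simp; omega)]
          rw [get?_foldl_insert_range ((c :: rest.takeWhile PySem.Chars.isdigit).length) i _ _ _ _ _
            (by omega) (by omega) (by omega)]
          unfold runVal
          rw [hrs, List.drop_zero, ← hds_tw]
        · -- beyond the leading run: recurse on the rest of the row
          have hgtL : (c :: rest.takeWhile PySem.Chars.isdigit).length < u := by
            rcases Nat.lt_or_ge (c :: rest.takeWhile PySem.Chars.isdigit).length u with h9 | h9
            · exact h9
            · exfalso
              have hu' : u = (c :: rest.takeWhile PySem.Chars.isdigit).length := by omega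
              have hne : rest.dropWhile PySem.Chars.isdigit ≠ [] := by
                intro hnil
                have h8 : (c :: rest).length = (c :: rest.takeWhile PySem.Chars.isdigit).length := by
                  conv_lhs => rw [hsplit]
                  rw [hnil]
                  simp
                omega
              have h0lt : 0 < (rest.dropWhile PySem.Chars.isdigit).length :=
                List.length_pos_of_ne_nil hne
              have hr0 : PySem.Chars.isdigit ((rest.dropWhile PySem.Chars.isdigit)[0]'h0lt) = false := by
                have h7 := List.head_dropWhile_not PySem.Chars.isdigit hne
                rwa [← List.getElem_zero_eq_head] at h7
              have hgu : (c :: rest)[u]? = (rest.dropWhile PySem.Chars.isdigit)[0]? := by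
                conv_lhs => rw [hsplit]
                rw [List.getElem?_append_right (by omega)]
                congr 1
                omega
              rw [List.getElem?_eq_getElem hu, List.getElem?_eq_getElem h0lt] at hgu
              rw [Option.some.inj hgu, hr0] at hd
              simp at hd
          have hlenr : (c :: rest).length
              = (c :: rest.takeWhile PySem.Chars.isdigit).length
                + (rest.dropWhile PySem.Chars.isdigit).length := by
            conv_lhs => rw [hsplit]
            simp
            omega
          have hx' : u - (c :: rest.takeWhile PySem.Chars.isdigit).length
              < (rest.dropWhile PySem.Chars.isdigit).length := by omega
          have heq : (rest.dropWhile PySem.Chars.isdigit)[u - (c :: rest.takeWhile PySem.Chars.isdigit).length]'hx'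
              = (c :: rest)[u]'hu := by
            have h8 : (c :: rest)[u]? = (rest.dropWhile PySem.Chars.isdigit)[u - (c :: rest.takeWhile PySem.Chars.isdigit).length]? := by
              conv_lhs => rw [hsplit]
              rw [List.getElem?_append_right (by omega)]
            rw [List.getElem?_eq_getElem hu, List.getElem?_eq_getElem hx'] at h8
            exact (Option.some.inj h8).symm
          have hne : rest.dropWhile PySem.Chars.isdigit ≠ [] :=
            List.ne_nil_of_length_pos (by omega)
          have htake : (c :: rest).take u
              = (c :: rest.takeWhile PySem.Chars.isdigit)
                ++ (rest.dropWhile PySem.Chars.isdigit).take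
                     (u - (c :: rest.takeWhile PySem.Chars.isdigit).length) := by
            conv_lhs => rw [hsplit]
            rw [List.take_append, List.take_of_length_le (by omega)]
          have hlpre : (((c :: rest).take u).reverse.takeWhile PySem.Chars.isdigit).length
              = (((rest.dropWhile PySem.Chars.isdigit).take
                    (u - (c :: rest.takeWhile PySem.Chars.isdigit).length)).reverse.takeWhile
                   PySem.Chars.isdigit).length := by
            rw [htake, List.reverse_append, List.takeWhile_append]
            have hr0 : PySem.Chars.isdigit ((rest.dropWhile PySem.Chars.isdigit)[0]'(by omega)) = false := by
              have h := List.head_dropWhile_not PySem.Chars.isdigit hne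
              rwa [← List.getElem_zero_eq_head] at h
            have hnotall : (((rest.dropWhile PySem.Chars.isdigit).take
                  (u - (c :: rest.takeWhile PySem.Chars.isdigit).length)).reverse.takeWhile
                  PySem.Chars.isdigit).length
                ≠ ((rest.dropWhile PySem.Chars.isdigit).take
                  (u - (c :: rest.takeWhile PySem.Chars.isdigit).length)).reverse.length := by
              intro h
              have hallr := List.takeWhile_eq_self_iff.mp
                (List.Sublist.eq_of_length (List.takeWhile_sublist _) h)
              have hmem : (rest.dropWhile PySem.Chars.isdigit)[0]'(by omega)
                  ∈ ((rest.dropWhile PySem.Chars.isdigit).take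
                      (u - (c :: rest.takeWhile PySem.Chars.isdigit).length)).reverse := by
                apply List.mem_reverse.mpr
                apply List.mem_take_iff_getElem.mpr
                exact ⟨0, by omega, rfl⟩
              have hcontr := hallr _ hmem
              rw [hr0] at hcontr; simp at hcontr
            rw [if_neg hnotall]
          have hrs : runStart (c :: rest) u
              = (c :: rest.takeWhile PySem.Chars.isdigit).length
                + runStart (rest.dropWhile PySem.Chars.isdigit)
                    (u - (c :: rest.takeWhile PySem.Chars.isdigit).length) := by
            unfold runStart
            rw [hlpre]
            have := lpre_le (rest.dropWhile PySem.Chars.isdigit)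
              (u - (c :: rest.takeWhile PySem.Chars.isdigit).length)
            omega
          have hdrop : (c :: rest).drop (runStart (c :: rest) u)
              = (rest.dropWhile PySem.Chars.isdigit).drop
                  (runStart (rest.dropWhile PySem.Chars.isdigit)
                    (u - (c :: rest.takeWhile PySem.Chars.isdigit).length)) := by
            rw [hrs]
            conv_lhs => rw [hsplit]
            rw [List.drop_append, List.drop_eq_nil_of_le (by omega)]
            simp
          have hkey : i + (u : Int)
              = (i + ((c :: rest.takeWhile PySem.Chars.isdigit).length : Int))
                + ((u - (c :: rest.takeWhile PySem.Chars.isdigit).length : Nat) : Int) := by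
            omega
          rw [hkey, ih y (rest.dropWhile PySem.Chars.isdigit) _ _
            (u - (c :: rest.takeWhile PySem.Chars.isdigit).length) (by simp at h ⊢; omega) hx'
            (by rw [heq]; exact hd)]
          unfold runVal
          rw [hdrop]
      · -- head is not a digit: skip it
        rw [if_neg hc]
        have hu1 : 1 ≤ u := by
          rcases Nat.eq_zero_or_pos u with h0 | h1
          · subst h0; simp at hd; rw [hd] at hc; simp at hc
          · exact h1
        have hx' : u - 1 < rest.length := by simp at hu; omega
        have heq : rest[u - 1]'hx' = (c :: rest)[u]'hu := by
          have h8 : (c :: rest)[u]? = rest[u - 1]? := by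
            conv_lhs => rw [show u = (u - 1) + 1 by omega]
            exact List.getElem?_cons_succ
          rw [List.getElem?_eq_getElem hu, List.getElem?_eq_getElem hx'] at h8
          exact (Option.some.inj h8).symm
        have htake : (c :: rest).take u = c :: rest.take (u - 1) := by
          conv_lhs => rw [show u = (u - 1) + 1 by omega]
          exact List.take_succ_cons
        have hlpre : (((c :: rest).take u).reverse.takeWhile PySem.Chars.isdigit).length
            = ((rest.take (u - 1)).reverse.takeWhile PySem.Chars.isdigit).length := by
          rw [htake, List.reverse_cons, List.takeWhile_append]
          split
          · next h9 =>
            rw [List.takeWhile_cons_of_neg (by simp [hc]), List.length_append, ← h9]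
            simp
          · rfl
        have hrs : runStart (c :: rest) u = 1 + runStart rest (u - 1) := by
          unfold runStart
          rw [hlpre]
          have := lpre_le rest (u - 1)
          omega
        have hdrop : (c :: rest).drop (runStart (c :: rest) u)
            = rest.drop (runStart rest (u - 1)) := by
          rw [hrs]
          conv_lhs => rw [show 1 + runStart rest (u - 1) = runStart rest (u - 1) + 1 by omega]
          exact List.drop_succ_cons
        have hkey : i + (u : Int) = (i + 1) + ((u - 1 : Nat) : Int) := by omega
        rw [hkey, ih y rest (i + 1) t (u - 1) (by simp at h; omega) hx'
          (by rw [heq]; exact hd)]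
        unfold runVal
        rw [hdrop]

-- rows processed after row p.2 never touch keys of that row
lemma rowsFold_get_out (rows : List String) : ∀ (k : Int) (t : PySem.Dict (Int × Int) Int)
    (p : Int × Int), p.2 < k →
    ((PySem.List.enumerate rows k).foldl (fun t q => bScanRow q.1 q.2.toList 0 t q.2.toList.length) t).get? p
      = t.get? p := by
  induction rows with
  | nil => intro k t p hp; rw [PySem.List.enumerate_nil, List.foldl_nil]
  | cons r rows ih =>
    intro k t p hp
    rw [PySem.List.enumerate_cons, List.foldl_cons, ih (k + 1) _ p (by omega)]
    exact bScanRow_get_out r.toList.length k r.toList 0 t p le_rfl (Or.inl (by omega))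

-- the full table maps (u, y) to the value of the run containing column u of row y
lemma rowsFold_get (rows : List String) : ∀ (k y : Int) (line : String) (u : Nat)
    (t : PySem.Dict (Int × Int) Int) (c : Char), k ≤ y →
    rows[(y - k).toNat]? = some line →
    line.toList[u]? = some c → PySem.Chars.isdigit c = true →
    ((PySem.List.enumerate rows k).foldl (fun t q => bScanRow q.1 q.2.toList 0 t q.2.toList.length) t).get?
        ((u : Int), y) = some (runVal line.toList u) := by
  induction rows with
  | nil => intro k y line u t c hk hrow; simp at hrow
  | cons r rows ih =>
    intro k y line u t c hk hrow hu hd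
    rw [PySem.List.enumerate_cons, List.foldl_cons]
    by_cases hy : y = k
    · subst hy
      have h0 : (y - y).toNat = 0 := by omega
      rw [h0] at hrow
      simp only [List.getElem?_cons_zero, Option.some.injEq] at hrow
      subst hrow
      rw [rowsFold_get_out rows (y + 1) _ _ (by simp)]
      have hult : u < r.toList.length := by
        rcases List.getElem?_eq_some_iff.mp hu with ⟨h9, _⟩
        exact h9
      have hgu : r.toList[u]'hult = c := by
        have := (List.getElem?_eq_getElem hult).symm.trans hu
        exact Option.some.inj this
      have := bScanRow_get_run r.toList.length y r.toList 0 t u le_rfl hult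
        (by rw [hgu]; exact hd)
      simpa using this
    · have hk1 : k + 1 ≤ y := by omega
      have hidx : (y - k).toNat = (y - (k + 1)).toNat + 1 := by omega
      rw [hidx, List.getElem?_cons_succ] at hrow
      exact ih (k + 1) y line u _ c hk1 hrow hu hd

-- the two per-location loop bodies agree on every admitted location
lemma body_eq (lines : List String) (l : List Int) (mult : Int)
    (hp : PreLoc lines l = true) :
    (pyUnpack2 l).elim mult (fun xy =>
      (PySem.List.pyGet? lines xy.2).elim mult (fun line =>
        let s := line.toList
        let x1 := aLeftWalk s xy.1 (2 * s.length + 2)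
        let num := aRightWalk s x1 [] (2 * s.length + 2)
        mult * (PySem.Int.ofChars? num).getD 0))
    = (pyUnpack2 l).elim mult (fun xy =>
      (((PySem.List.enumerate lines 0).foldl
          (fun t p => bScanRow p.1 p.2.toList 0 t p.2.toList.length) PySem.Dict.empty).get? xy).elim mult
        (fun v => mult * v)) := by
  rcases l with _ | ⟨x, _ | ⟨y, _ | ⟨z, rest⟩⟩⟩
  · simp [PreLoc] at hp
  · simp [PreLoc] at hp
  · simp only [PreLoc] at hp
    simp only [pyUnpack2, Option.elim_some]
    cases hline : PySem.List.pyGet? lines y with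
    | none => rw [hline] at hp; simp at hp
    | some line =>
      rw [hline] at hp
      simp only [Option.elim_some, Bool.and_eq_true, decide_eq_true_eq] at hp
      obtain ⟨⟨hx0, hy0⟩, hp2⟩ := hp
      cases hcx : PySem.List.pyGet? line.toList x with
      | none => rw [hcx] at hp2; simp at hp2
      | some c =>
        rw [hcx] at hp2
        simp only [Option.elim_some, Bool.and_eq_true, Bool.not_eq_eq_eq_not, Bool.not_true] at hp2
        obtain ⟨⟨hdig, hna⟩, hnw⟩ := hp2
        set s := line.toList with hs
        have hxu : x = ((x.toNat : Nat) : Int) := by omega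
        have hult : x.toNat < s.length := by
          by_contra h9
          rw [(PySem.List.pyGet?_eq_none_iff s x).mpr
            (by unfold PySem.Raise.InRange; omega)] at hcx
          simp at hcx
        have hgu : s[x.toNat]'hult = c := by
          rw [PySem.List.pyGet?_of_nonneg _ hx0, List.getElem?_eq_getElem hult] at hcx
          exact Option.some.inj hcx
        have hlen1 : 1 ≤ s.length := by omega
        -- Pre_'s no-wrap clause: if the prefix up to x is all digits, the last char is no digit
        have hlast : (s.take x.toNat).all PySem.Chars.isdigit = true →
            (s[s.length - 1]?).map PySem.Chars.isdigit = some false := by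
          intro hpre
          have htk : (s.take (x.toNat + 1)).all PySem.Chars.isdigit = true := by
            rw [List.take_add_one, List.getElem?_eq_getElem hult]
            simp only [Option.toList_some, List.all_append, hpre, Bool.true_and, List.all_cons,
              List.all_nil, Bool.and_true]
            rw [hgu]; exact hdig
          rw [htk, Bool.true_and] at hnw
          rw [List.getElem?_eq_getElem (by omega : s.length - 1 < s.length)] at hnw ⊢
          simp only [Option.map_some] at hnw
          simp only [Option.map_some, Option.some.injEq]
          simpa using hnw
        -- A's walks compute the run containing x
        have hrsle : runStart s x.toNat ≤ x.toNat := by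
          unfold runStart; omega
        have hA1 : aLeftWalk s x (2 * s.length + 2) = ((runStart s x.toNat : Nat) : Int) := by
          rw [hxu]
          exact aLeftWalk_eq s (2 * s.length + 2) x.toNat hult hlast (by omega)
        have hA2 : aRightWalk s ((runStart s x.toNat : Nat) : Int) [] (2 * s.length + 2)
            = [] ++ (s.drop (runStart s x.toNat)).takeWhile PySem.Chars.isdigit :=
          aRightWalk_eq s (2 * s.length + 2) (runStart s x.toNat) []
            (drop_all_false_mono s (runStart s x.toNat) x.toNat hrsle hna) (by omega)
        -- B's table lookup finds the same run value
        have hB : ((PySem.List.enumerate lines 0).foldl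
            (fun t p => bScanRow p.1 p.2.toList 0 t p.2.toList.length) PySem.Dict.empty).get? (x, y)
            = some (runVal s x.toNat) := by
          rw [hxu]
          refine rowsFold_get lines 0 y line x.toNat PySem.Dict.empty c hy0 ?_ ?_ hdig
          · have h9 : (y - 0).toNat = y.toNat := by omega
            rw [h9, ← PySem.List.pyGet?_of_nonneg lines hy0]
            exact hline
          · rw [← PySem.List.pyGet?_of_nonneg s hx0]
            exact hcx
        simp only [hB, Option.elim_some]
        rw [hA1, hA2, List.nil_append]
        rfl
  · simp [PreLoc] at hp

-- ===== VERDICT (by name: the statement is the Claim_ definition above) =====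
theorem count_ratio_spec : Claim_equal_count_ratio := by
  intro lines locs _ hpre
  unfold Spec_count_ratio
  unfold count_ratio count_ratio_alt
  apply PySem.List.foldl_congr_mem
  intro acc l hl
  have hp : PreLoc lines l = true := by
    unfold Pre_count_ratio at hpre
    rw [List.all_eq_true] at hpre
    exact hpre l hl
  exact body_eq lines l acc hp
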